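-- pv_equiv track=rewrite | github.com/ruxi22/Bioinformatics | ex2_lab8.py | find_inverted_repeats
-- ===== SOURCE A (Python) =====
-- def reverse_complement(seq):
--     comp = str.maketrans("ACGT", "TGCA")
--     return seq.translate(comp)[::-1]
--
-- def find_inverted_repeats(seq, min_len=4, max_len=6):
--     irs = []
--     n = len(seq)
--
--     for L in range(min_len, max_len + 1):
--         for i in range(n - L):
--             left = seq[i:i + L]
--             right = reverse_complement(left)
--
--             j = seq.find(right, i + L)
--             if j != -1:
--                 irs.append((i, j, L))
--
--     return irs
-- ===== SOURCE B (Python) =====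
-- def reverse_complement(seq):
--     comp = str.maketrans("ACGT", "TGCA")
--     return seq.translate(comp)[::-1]
--
-- def find_inverted_repeats(seq, min_len=4, max_len=6):
--     # Backward sweep per length: a dict window -> smallest start index >= threshold,
--     # maintained by overwriting while scanning right-to-left, one pass per length,
--     # with no seq.find scan per window.  The length range is clamped to len(seq)
--     # (longer windows cannot occur) and the reverse complement of the whole
--     # sequence is computed once: reverse_complement(seq[i:i+L]) == rc_full[n-i-L:n-i].
--     n = len(seq)
--     rc_full = reverse_complement(seq)
--     irs = []
--     for L in range(min_len, min(max_len, n) + 1):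
--         first = {}
--         found = []
--         for i in range(n - L - 1, -1, -1):
--             j = i + L
--             if j + L <= n:
--                 first[seq[j:j + L]] = j   # j decreases, so this entry is the minimum so far
--             m = first.get(rc_full[n - j:n - i])
--             if m is not None:
--                 found.append((i, m, L))
--         irs.extend(reversed(found))
--     return irs
-- ===== Notes on version B (the rewrite author's own statement) =====
-- stated objective: alternative
-- what changed: Replaces A's per-window seq.find forward scan with one right-to-left sweep per length maintaining a dict from each window string to its smallest start index at or beyond the current threshold, with the length range clamped to len(seq) and the reverse complement of the whole sequence computed once.
-- outside the precondition, e.g. on find_inverted_repeats('', -1, -1): A returns [(0, 0, -1)], B returns [(0, -1, -1)]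
import Mathlib
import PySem

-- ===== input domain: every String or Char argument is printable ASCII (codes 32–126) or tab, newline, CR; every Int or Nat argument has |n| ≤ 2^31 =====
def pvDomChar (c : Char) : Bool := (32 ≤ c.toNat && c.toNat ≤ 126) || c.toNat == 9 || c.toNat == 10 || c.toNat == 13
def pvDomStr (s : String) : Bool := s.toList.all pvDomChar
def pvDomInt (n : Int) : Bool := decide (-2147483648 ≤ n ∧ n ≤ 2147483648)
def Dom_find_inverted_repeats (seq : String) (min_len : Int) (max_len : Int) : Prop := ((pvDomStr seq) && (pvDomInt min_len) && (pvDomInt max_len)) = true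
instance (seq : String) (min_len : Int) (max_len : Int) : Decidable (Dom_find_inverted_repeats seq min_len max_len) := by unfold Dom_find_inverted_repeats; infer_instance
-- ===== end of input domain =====

-- B replaces A's per-window seq.find forward scan with one right-to-left sweep per length
-- maintaining a dict from window string to its smallest start index beyond the threshold
-- (objective: alternative — a different algorithm for the same result).


-- ===== PORT A =====
-- str.maketrans("ACGT", "TGCA") + str.translate = this per-character map (exact: translate
-- maps each character independently, all other characters unchanged).
def rcChar (c : Char) : Char :=
  if c = 'A' then 'T' else if c = 'C' then 'G' else if c = 'G' then 'C' else if c = 'T' then 'A' else c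

-- reverse_complement(seq) = seq.translate(comp)[::-1]; [::-1] is List.reverse
-- (PySem.List.slice?_none_none_neg_one). Shared helper: both Pythons contain the identical def.
def reverse_complement (cs : List Char) : List Char := (cs.map rcChar).reverse

def find_inverted_repeats (seq : String) (min_len : Int) (max_len : Int) : List (Int × Int × Int) :=
  let s := seq.toList
  let n : Int := s.length
  (PySem.List.pyRange min_len (max_len + 1) 1).foldl (fun irs L =>
    (PySem.List.pyRange 0 (n - L) 1).foldl (fun irs i =>
      let left := PySem.List.slice s (some i) (some (i + L))
      let right := reverse_complement left
      let j := PySem.Chars.findFrom s right (i + L) none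
      if j ≠ -1 then irs ++ [(i, j, L)] else irs) irs) []

-- ===== PORT B =====
def find_inverted_repeats_alt (seq : String) (min_len : Int) (max_len : Int) : List (Int × Int × Int) :=
  let s := seq.toList
  let n : Int := s.length
  let rc_full := reverse_complement s
  (PySem.List.pyRange min_len (min max_len n + 1) 1).foldl (fun irs L =>
    let res := (PySem.List.pyRange (n - L - 1) (-1) (-1)).foldl
      (fun (st : PySem.Dict (List Char) Int × List (Int × Int × Int)) i =>
        let j := i + L
        let first := if j + L ≤ n then st.1.insert (PySem.List.slice s (some j) (some (j + L))) j else st.1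
        match first.get? (PySem.List.slice rc_full (some (n - j)) (some (n - i))) with
        | some m => (first, st.2 ++ [(i, m, L)])
        | none => (first, st.2))
      (PySem.Dict.empty, [])
    irs ++ res.2.reverse) []

-- ===== PRECONDITION & SPEC =====
-- Pre_ excludes inputs where some scanned window length L is ≤ 0: there A matches empty
-- reverse-complements through Python's empty-substring seq.find with clamped (possibly
-- negative) starts — an accidental corner of a function about length-L repeats.
def Pre_find_inverted_repeats (seq : String) (min_len : Int) (max_len : Int) : Prop :=
  1 ≤ min_len ∨ max_len < min_len
instance (seq : String) (min_len : Int) (max_len : Int) : Decidable (Pre_find_inverted_repeats seq min_len max_len) := by unfold Pre_find_inverted_repeats; infer_instance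

def pvWitness_find_inverted_repeats : String × Int × Int := ("ACGTATACGT", 2, 3)

def Spec_find_inverted_repeats (seq : String) (min_len : Int) (max_len : Int) (out : List (Int × Int × Int)) : Prop := out = find_inverted_repeats_alt seq min_len max_len
instance (seq : String) (min_len : Int) (max_len : Int) (out : List (Int × Int × Int)) : Decidable (Spec_find_inverted_repeats seq min_len max_len out) := by unfold Spec_find_inverted_repeats; infer_instance

-- ===== CLAIM (what is proved, stated in full; the proofs are below) =====
def Claim_equal_find_inverted_repeats : Prop := ∀ (seq : String) (min_len : Int) (max_len : Int), Dom_find_inverted_repeats seq min_len max_len → Pre_find_inverted_repeats seq min_len max_len → Spec_find_inverted_repeats seq min_len max_len (find_inverted_repeats seq min_len max_len)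

-- ===== LEMMAS AND PROOFS =====

-- the window seq[p:p+L]
def win (s : List Char) (L p : Int) : List Char := PySem.List.slice s (some p) (some (p + L))

-- smallest p with k ≤ p ≤ len(s) - L whose window equals key (none if no such p)
def minWin (s : List Char) (L k : Int) (key : List Char) : Option Int :=
  (PySem.List.pyRange k ((s.length : Int) - L + 1) 1).find? (fun p => win s L p == key)

-- B's inner-loop step (the literal lambda of find_inverted_repeats_alt, named for the proofs)
def stepB (s : List Char) (L : Int) (st : PySem.Dict (List Char) Int × List (Int × Int × Int))
    (i : Int) : PySem.Dict (List Char) Int × List (Int × Int × Int) :=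
  let j := i + L
  let first := if j + L ≤ (s.length : Int) then st.1.insert (PySem.List.slice s (some j) (some (j + L))) j else st.1
  match first.get? (PySem.List.slice (reverse_complement s) (some ((s.length : Int) - j)) (some ((s.length : Int) - i))) with
  | some m => (first, st.2 ++ [(i, m, L)])
  | none => (first, st.2)

-- the two loop bodies, named for the proofs (definitionally the ports' lambdas)
def bodyA (s : List Char) (irs : List (Int × Int × Int)) (L : Int) : List (Int × Int × Int) :=
  (PySem.List.pyRange 0 ((s.length : Int) - L) 1).foldl (fun irs i =>
    if PySem.Chars.findFrom s (reverse_complement (PySem.List.slice s (some i) (some (i + L)))) (i + L) none ≠ -1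
    then irs ++ [(i, PySem.Chars.findFrom s (reverse_complement (PySem.List.slice s (some i) (some (i + L)))) (i + L) none, L)]
    else irs) irs

def bodyB (s : List Char) (irs : List (Int × Int × Int)) (L : Int) : List (Int × Int × Int) :=
  irs ++ (((PySem.List.pyRange ((s.length : Int) - L - 1) (-1) (-1)).foldl (stepB s L)
    (PySem.Dict.empty, [])).2).reverse

-- the per-index entry both inner loops produce
def entry (s : List Char) (L i : Int) : Option (Int × Int × Int) :=
  (minWin s L (i + L) (reverse_complement (win s L i))).map (fun m => (i, m, L))

lemma length_rc (cs : List Char) : (reverse_complement cs).length = cs.length := by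
  simp [reverse_complement]

lemma length_win (s : List Char) (L p : Int) (h0 : 0 ≤ p) (hL : 0 ≤ L)
    (hn : p + L ≤ (s.length : Int)) : (win s L p).length = L.toNat := by
  unfold win
  rw [PySem.List.slice_toNat s h0 (by omega)]
  simp only [List.length_take, List.length_drop]
  omega

lemma rev_window (t : List Char) (a b : Nat) (h : a + b ≤ t.length) :
    (t.reverse.drop (t.length - (a + b))).take b = ((t.drop a).take b).reverse := by
  rw [List.drop_reverse, List.take_reverse]
  congr 1
  have e : t.length - (t.length - (a + b)) = a + b := by omega
  rw [e, List.length_take]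
  have e2 : min (a + b) t.length - b = a := by omega
  rw [e2, List.drop_take]
  congr 1
  omega

-- rc_full[n-i-L : n-i] is the reverse complement of the window seq[i:i+L]
lemma rc_slice (s : List Char) (L i : Int) (h0 : 0 ≤ i) (hL : 0 ≤ L)
    (hn : i + L ≤ (s.length : Int)) :
    PySem.List.slice (reverse_complement s) (some ((s.length : Int) - (i + L))) (some ((s.length : Int) - i))
      = reverse_complement (win s L i) := by
  have h1 : (0:Int) ≤ (s.length : Int) - (i + L) := by omega
  have h2 : (0:Int) ≤ (s.length : Int) - i := by omega
  rw [PySem.List.slice_toNat _ h1 h2]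
  unfold win
  rw [PySem.List.slice_toNat s h0 (by omega)]
  unfold reverse_complement
  rw [List.map_take, List.map_drop]
  have e1 : ((s.length : Int) - (i + L)).toNat = (s.map rcChar).length - (i.toNat + L.toNat) := by
    simp; omega
  have e2 : ((s.length : Int) - i).toNat - ((s.length : Int) - (i + L)).toNat = L.toNat := by omega
  have e3 : (i + L).toNat - i.toNat = L.toNat := by omega
  rw [e2, e1, e3]
  exact rev_window (s.map rcChar) i.toNat L.toNat (by simp; omega)

lemma minWin_none (s : List Char) (L k : Int) (key : List Char)
    (h : (s.length : Int) - L + 1 ≤ k) : minWin s L k key = none := by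
  unfold minWin
  rw [PySem.List.pyRange_one_eq_nil h]
  rfl

lemma minWin_cons (s : List Char) (L k : Int) (key : List Char)
    (h : k ≤ (s.length : Int) - L) :
    minWin s L k key = if win s L k == key then some k else minWin s L (k + 1) key := by
  unfold minWin
  rw [PySem.List.pyRange_one_cons (by omega)]
  cases hb : (win s L k == key) <;> simp [hb]

lemma find?_pyRange_eq_some {pred : Int → Bool} {b m : Int}
    (h2 : m < b) (h3 : pred m = true) :
    ∀ (k : Nat) (a : Int), (m - a).toNat = k → a ≤ m →
      (∀ p, a ≤ p → p < m → pred p = false) →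
      (PySem.List.pyRange a b 1).find? pred = some m := by
  intro k
  induction k with
  | zero =>
    intro a hk h1 _
    have ham : a = m := by omega
    subst ham
    rw [PySem.List.pyRange_one_cons (by omega), List.find?_cons]
    simp [h3]
  | succ k ih =>
    intro a hk h1 h4
    have ham : a < m := by omega
    rw [PySem.List.pyRange_one_cons (by omega), List.find?_cons]
    simp only [h4 a le_rfl ham]
    exact ih (a + 1) (by omega) (by omega) (fun p hp1 hp2 => h4 p (by omega) hp2)

-- window-as-prefix characterisation
lemma win_beq_iff {s key : List Char} {L p : Int} (hL : 1 ≤ L) (hp : 0 ≤ p)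
    (hkey : key.length = L.toNat) :
    (win s L p == key) = true ↔ key <+: s.drop p.toNat := by
  have hwin : win s L p = (s.drop p.toNat).take L.toNat := by
    unfold win
    rw [PySem.List.slice_toNat s hp (by omega)]
    congr 1
    omega
  rw [beq_iff_eq, hwin, ← hkey, List.prefix_iff_eq_take]
  exact eq_comm

-- A's find-from-start equals the minimal matching window position
lemma findFrom_eq_minWin (s key : List Char) (L : Int) (k : Nat) (hk : k ≤ s.length)
    (hL : 1 ≤ L) (hkey : key.length = L.toNat) :
    (if PySem.Chars.findFrom s key (k : Int) none = -1 then none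
     else some (PySem.Chars.findFrom s key (k : Int) none)) = minWin s L (k : Int) key := by
  by_cases hin : key <:+: s.drop k
  · have hne : PySem.Chars.findFrom s key (k : Int) none ≠ -1 := by
      rw [ne_eq, PySem.Chars.findFrom_natCast_eq_neg_one_iff s key k hk]
      simpa using hin
    obtain ⟨hkr, hpre, hminim⟩ := PySem.Chars.findFrom_natCast_spec s key k hk hne
    set r := PySem.Chars.findFrom s key (k : Int) none with hr
    have hr0 : 0 ≤ r := le_trans (by exact_mod_cast Nat.zero_le k) hkr
    have hrlen : key.length ≤ s.length - r.toNat := by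
      have := hpre.length_le
      simpa using this
    have hrb : r < (s.length : Int) - L + 1 := by
      have h1 : L.toNat ≤ s.length - r.toNat := hkey ▸ hrlen
      have h2 : r.toNat ≤ s.length := by omega
      omega
    rw [if_neg hne]
    symm
    apply find?_pyRange_eq_some hrb
      ((win_beq_iff hL hr0 hkey).mpr hpre) (r - (k : Int)).toNat (k : Int) rfl hkr
    intro p hp1 hp2
    have hp0 : 0 ≤ p := le_trans (by exact_mod_cast Nat.zero_le k) hp1
    have hnp : ¬ key <+: s.drop p.toNat :=
      hminim p.toNat (by omega) (by omega)
    rcases hb : (win s L p == key) with _ | _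
    · rfl
    · exact absurd ((win_beq_iff hL hp0 hkey).mp hb) hnp
  · rw [if_pos ((PySem.Chars.findFrom_natCast_eq_neg_one_iff s key k hk).mpr hin)]
    symm
    unfold minWin
    rw [List.find?_eq_none]
    intro p hp hb
    have hp1 : (k : Int) ≤ p := ((PySem.List.mem_pyRange_one).mp hp).1
    have hp0 : 0 ≤ p := le_trans (by exact_mod_cast Nat.zero_le k) hp1
    have hpre : key <+: s.drop p.toNat := (win_beq_iff hL hp0 hkey).mp hb
    apply hin
    rw [← PySem.Chars.isIn_iff_infix,
      ← PySem.Chars.exists_prefix_drop_iff_isIn]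
    refine ⟨p.toNat - k, ?_⟩
    rw [List.drop_drop]
    have : k + (p.toNat - k) = p.toNat := by omega
    rw [this]
    exact hpre

-- generic fold shape: conditional append is a filterMap
lemma foldl_append_filterMap {α β : Type} (l : List α) (g : α → Option β) (acc : List β) :
    l.foldl (fun acc x => acc ++ (g x).toList) acc = acc ++ l.filterMap g := by
  induction l generalizing acc with
  | nil => simp
  | cons x t ih =>
    cases hg : g x <;> simp [List.foldl_cons, hg, ih]

-- B's backward sweep produces (in reverse) exactly the entries of the scanned indices
lemma loopB_inv (s : List Char) (L : Int) (hL : 1 ≤ L) :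
    ∀ (k : Nat) (a : Int) (d : PySem.Dict (List Char) Int) (acc : List (Int × Int × Int)),
      (a + 1).toNat = k → -1 ≤ a → a ≤ (s.length : Int) - L - 1 →
      (∀ key, d.get? key = minWin s L (a + 1 + L) key) →
      ((PySem.List.pyRange a (-1) (-1)).foldl (stepB s L) (d, acc)).2
        = acc ++ ((PySem.List.pyRange 0 (a + 1) 1).filterMap (entry s L)).reverse := by
  intro k
  induction k with
  | zero =>
    intro a d acc hk h1 _ _
    have ha : a = -1 := by omega
    subst ha
    rw [PySem.List.pyRange_neg_one_eq_nil le_rfl]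
    norm_num [PySem.List.pyRange_one_eq_nil]
  | succ k ih =>
    intro a d acc hk h1 han hinv
    have ha0 : 0 ≤ a := by omega
    rw [PySem.List.pyRange_neg_one_cons (by omega)]
    rw [List.foldl_cons]
    -- the dict after the conditional insert satisfies the invariant at threshold a + L
    have hd' : ∀ key, (if a + L + L ≤ (s.length : Int)
          then d.insert (PySem.List.slice s (some (a + L)) (some (a + L + L))) (a + L) else d).get? key
        = minWin s L (a + L) key := by
      intro key
      have he : a + 1 + L = a + L + 1 := by ring
      by_cases hc : a + L + L ≤ (s.length : Int)
      · rw [if_pos hc, PySem.Dict.get?_insert, minWin_cons s L (a + L) key (by omega)]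
        have hwp : PySem.List.slice s (some (a + L)) (some (a + L + L)) = win s L (a + L) := rfl
        by_cases hkey : key = win s L (a + L)
        · rw [if_pos (hwp ▸ hkey), if_pos (by simp [hkey])]
        · rw [if_neg (fun h => hkey (hwp ▸ h)), if_neg (by simp [beq_iff_eq]; exact fun h => hkey h.symm),
            hinv key, he]
      · rw [if_neg hc, hinv key, he,
          minWin_none s L (a + L + 1) key (by omega), minWin_none s L (a + L) key (by omega)]
    -- unfold one step of the loop
    have hstep : stepB s L (d, acc) a
        = (if a + L + L ≤ (s.length : Int)
            then d.insert (PySem.List.slice s (some (a + L)) (some (a + L + L))) (a + L) else d,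
           match minWin s L (a + L) (reverse_complement (win s L a)) with
           | some m => acc ++ [(a, m, L)]
           | none => acc) := by
      dsimp only [stepB]
      rw [rc_slice s L a ha0 (by omega) (by omega),
        hd' (reverse_complement (win s L a))]
      cases minWin s L (a + L) (reverse_complement (win s L a)) <;> rfl
    rw [hstep]
    have he2 : a - 1 + 1 = a := by ring
    have ih' := ih (a - 1)
      (if a + L + L ≤ (s.length : Int)
        then d.insert (PySem.List.slice s (some (a + L)) (some (a + L + L))) (a + L) else d)
      (match minWin s L (a + L) (reverse_complement (win s L a)) with
       | some m => acc ++ [(a, m, L)]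
       | none => acc)
      (by omega) (by omega) (by omega)
      (by intro key; rw [hd' key]; congr 1; ring)
    rw [ih', he2]
    rw [show PySem.List.pyRange 0 (a + 1) 1 = PySem.List.pyRange 0 a 1 ++ [a] from
      PySem.List.pyRange_one_succ_right ha0]
    rw [List.filterMap_append, List.reverse_append]
    cases hm : minWin s L (a + L) (reverse_complement (win s L a)) <;>
      simp [entry, hm, List.append_assoc]

-- A's inner loop produces the same entries, forwards
lemma innerA_eq (s : List Char) (L : Int) (hL : 1 ≤ L) (irs : List (Int × Int × Int)) :
    bodyA s irs L = irs ++ (PySem.List.pyRange 0 ((s.length : Int) - L) 1).filterMap (entry s L) := by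
  unfold bodyA
  rw [PySem.List.foldl_congr_mem (g := fun irs i => irs ++ (entry s L i).toList)]
  · exact foldl_append_filterMap _ (entry s L) irs
  · intro acc i hi
    obtain ⟨hi0, hilt⟩ := (PySem.List.mem_pyRange_one).mp hi
    have hiL : 0 ≤ i + L := by omega
    have hkeq : ((i + L).toNat : Int) = i + L := Int.toNat_of_nonneg hiL
    have hklen : (i + L).toNat ≤ s.length := by omega
    have hkey : (reverse_complement (win s L i)).length = L.toNat := by
      rw [length_rc]
      exact length_win s L i hi0 (by omega) (by omega)
    have hbridge := findFrom_eq_minWin s (reverse_complement (win s L i)) L (i + L).toNat hklen hL hkey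
    rw [hkeq] at hbridge
    have hwin : PySem.List.slice s (some i) (some (i + L)) = win s L i := rfl
    rw [hwin]
    unfold entry
    rw [← hbridge]
    by_cases hf : PySem.Chars.findFrom s (reverse_complement (win s L i)) (i + L) none = -1
    · simp [hf]
    · simp [hf]

-- per length L ≥ 1, the two loop bodies agree
lemma body_eq (s : List Char) (L : Int) (hL : 1 ≤ L) (irs : List (Int × Int × Int)) :
    bodyA s irs L = bodyB s irs L := by
  rw [innerA_eq s L hL irs]
  unfold bodyB
  by_cases hn : (s.length : Int) - L - 1 < -1
  · rw [PySem.List.pyRange_neg_one_eq_nil (by omega), PySem.List.pyRange_one_eq_nil (by omega)]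
    rfl
  · rw [loopB_inv s L hL ((s.length : Int) - L - 1 + 1).toNat ((s.length : Int) - L - 1)
      PySem.Dict.empty [] rfl (by omega) le_rfl
      (by
        intro key
        rw [minWin_none s L ((s.length : Int) - L - 1 + 1 + L) key (by omega)]
        rfl)]
    rw [show (s.length : Int) - L - 1 + 1 = (s.length : Int) - L by ring]
    simp

-- window lengths beyond len(seq) contribute nothing to A's loop
lemma noopA (s : List Char) :
    ∀ (l : List Int), (∀ L ∈ l, (s.length : Int) < L) →
      ∀ irs, l.foldl (bodyA s) irs = irs := by
  intro l
  induction l with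
  | nil => intro _ irs; rfl
  | cons x t ih =>
    intro h irs
    rw [List.foldl_cons]
    have hx : bodyA s irs x = irs := by
      unfold bodyA
      rw [PySem.List.pyRange_one_eq_nil (by have := h x (List.mem_cons_self) ; omega)]
      rfl
    rw [hx]
    exact ih (fun L hL => h L (List.mem_cons_of_mem _ hL)) irs

-- ===== VERDICT (by name: the statement is the Claim_ definition above) =====
theorem find_inverted_repeats_spec : Claim_equal_find_inverted_repeats := by
  intro seq min_len max_len _ hpre
  unfold Spec_find_inverted_repeats find_inverted_repeats find_inverted_repeats_alt
  show (PySem.List.pyRange min_len (max_len + 1) 1).foldl (bodyA seq.toList) []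
    = (PySem.List.pyRange min_len (min max_len (seq.toList.length : Int) + 1) 1).foldl
        (bodyB seq.toList) []
  have hminle : min max_len (seq.toList.length : Int) ≤ max_len := min_le_left _ _
  have hminn : min max_len (seq.toList.length : Int) ≤ (seq.toList.length : Int) := min_le_right _ _
  rcases hpre with hpre | hpre
  · -- 1 ≤ min_len
    by_cases hm : min_len ≤ min max_len (seq.toList.length : Int) + 1
    · rw [PySem.List.pyRange_one_append min_len (min max_len (seq.toList.length : Int) + 1)
        (max_len + 1) hm (by omega)]
      rw [List.foldl_append]
      have hfirst : (PySem.List.pyRange min_len (min max_len (seq.toList.length : Int) + 1) 1).foldl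
            (bodyA seq.toList) []
          = (PySem.List.pyRange min_len (min max_len (seq.toList.length : Int) + 1) 1).foldl
            (bodyB seq.toList) [] := by
        apply PySem.List.foldl_congr_mem
        intro irs L hL
        exact body_eq seq.toList L (le_trans hpre ((PySem.List.mem_pyRange_one).mp hL).1) irs
      have htail : ∀ irs, (PySem.List.pyRange (min max_len (seq.toList.length : Int) + 1)
            (max_len + 1) 1).foldl (bodyA seq.toList) irs = irs := by
        apply noopA
        intro L hL
        obtain ⟨hL1, hL2⟩ := (PySem.List.mem_pyRange_one).mp hL
        rcases le_total max_len (seq.toList.length : Int) with hc | hc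
        · rw [min_eq_left hc] at hL1
          omega
        · rw [min_eq_right hc] at hL1
          omega
      rw [htail _]
      exact hfirst
    · -- B's clamped range is empty and every L in A's range exceeds len(seq)
      rw [PySem.List.pyRange_one_eq_nil (show min max_len (seq.toList.length : Int) + 1 ≤ min_len by omega)]
      apply noopA
      intro L hL
      obtain ⟨hL1, hL2⟩ := (PySem.List.mem_pyRange_one).mp hL
      rcases le_total max_len (seq.toList.length : Int) with hc | hc
      · rw [min_eq_left hc] at hm
        omega
      · rw [min_eq_right hc] at hm
        omega
  · -- empty length range on both sides
    rw [PySem.List.pyRange_one_eq_nil (by omega),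
      PySem.List.pyRange_one_eq_nil (by omega)]
    rfl
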